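-- pv_equiv track=rewrite | github.com/sinclairr08/shy-blog | boj_codes/Python3/1599.py | minsik_encode
-- ===== SOURCE A (Python) =====
-- dict = {
--     'a' : 'a',
--     'b' : 'b',
--     'k' : 'c',
--     'd' : 'd',
--     'e' : 'e',
--     'g' : 'f',
--     'h' : 'g',
--     'i' : 'h',
--     'l' : 'i',
--     'm' : 'j',
--     'n' : 'k',
--     'ng' : 'l',
--     'o' : 'm',
--     'p' : 'n',
--     'r' : 'o',
--     's' : 'p',
--     't' : 'q',
--     'u' : 'r',
--     'w' : 's',
--     'y' : 't'
-- }
--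
-- def minsik_encode(str):
--     encoded = []
--     prev_count = False
--     for i in range(len(str)):
--         if prev_count:
--             prev_count = False
--             continue
--
--         if str[i] == 'n' and i < len(str) - 1 and str[i + 1] == 'g':
--                 prev_count = True
--                 encoded.append(dict['ng'])
--         else:
--             encoded.append(dict[str[i]])
--
--
--     return ''.join(encoded)
-- ===== SOURCE B (Python) =====
-- CHAR_MAP = {
--     'a': 'a', 'b': 'b', 'k': 'c', 'd': 'd', 'e': 'e', 'g': 'f', 'h': 'g',
--     'i': 'h', 'l': 'i', 'm': 'j', 'n': 'k', 'o': 'm', 'p': 'n', 'r': 'o',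
--     's': 'p', 't': 'q', 'u': 'r', 'w': 's', 'y': 't',
-- }
--
-- def minsik_encode(str):
--     return 'l'.join(''.join(CHAR_MAP[c] for c in seg) for seg in str.split('ng'))
-- ===== Notes on version B (the rewrite author's own statement) =====
-- stated objective: idiomatic
-- what changed: Replaces the index loop with a lookahead-and-skip flag by splitting the string on the 'ng' digraph, mapping each segment's characters through a single-character dict, and joining the encoded segments with 'l' (the code for 'ng'); the split and join run in C instead of a per-index Python loop, a constant-factor speedup.
import Mathlib
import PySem

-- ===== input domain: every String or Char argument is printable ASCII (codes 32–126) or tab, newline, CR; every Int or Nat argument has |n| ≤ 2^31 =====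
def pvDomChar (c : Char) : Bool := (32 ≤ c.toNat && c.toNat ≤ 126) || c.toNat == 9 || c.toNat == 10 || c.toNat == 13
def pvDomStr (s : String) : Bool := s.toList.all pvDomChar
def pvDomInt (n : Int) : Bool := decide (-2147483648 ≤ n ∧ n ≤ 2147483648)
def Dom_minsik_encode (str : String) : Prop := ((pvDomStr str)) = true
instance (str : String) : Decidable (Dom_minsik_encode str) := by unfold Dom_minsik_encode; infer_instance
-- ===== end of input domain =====

-- B encodes via str.split('ng') + per-segment char mapping joined with 'l', instead of A's
-- index scan with a lookahead-and-skip flag (objective: idiomatic; same asymptotic cost).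

-- ===== PORT A =====
def minsikDict : PySem.Dict String String := PySem.Dict.mk
  [("a","a"),("b","b"),("k","c"),("d","d"),("e","e"),("g","f"),("h","g"),("i","h"),
   ("l","i"),("m","j"),("n","k"),("ng","l"),("o","m"),("p","n"),("r","o"),("s","p"),
   ("t","q"),("u","r"),("w","s"),("y","t")]

-- loop body of A's for-loop (state: encoded list so far, prev_count flag)
def minsikStep (s : List Char) (st : List String × Bool) (i : Int) : List String × Bool :=
  if st.2 then (st.1, false)
  else if PySem.List.pyGetD s i ' ' == 'n' && decide (i < (s.length : Int) - 1)
          && (PySem.List.pyGetD s (i + 1) ' ' == 'g') then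
    (st.1 ++ [minsikDict.getD "ng" ""], true)
  else
    (st.1 ++ [minsikDict.getD (String.ofList [PySem.List.pyGetD s i ' ']) ""], false)

def minsik_encode (str : String) : String :=
  PySem.Str.join ""
    ((PySem.List.pyRange 0 (str.toList.length : Int) 1).foldl (minsikStep str.toList) ([], false)).1

-- ===== PORT B =====
def minsikCharMap : PySem.Dict Char Char := PySem.Dict.mk
  [('a','a'),('b','b'),('k','c'),('d','d'),('e','e'),('g','f'),('h','g'),('i','h'),
   ('l','i'),('m','j'),('n','k'),('o','m'),('p','n'),('r','o'),('s','p'),('t','q'),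
   ('u','r'),('w','s'),('y','t')]

def minsik_encode_alt (str : String) : String :=
  String.ofList (PySem.Chars.join ['l']
    ((PySem.Chars.splitOn str.toList ['n','g']).map
      (fun seg => seg.map (fun c => minsikCharMap.getD c '?'))))

-- ===== PRECONDITION & SPEC =====
-- Pre_ excludes exactly the inputs on which A raises KeyError: strings containing a
-- character outside the mapped alphabet (B's Python raises KeyError there too).
def Pre_minsik_encode (str : String) : Prop :=
  (str.toList.all (fun c =>
    ['a','b','k','d','e','g','h','i','l','m','n','o','p','r','s','t','u','w','y'].contains c)) = true
instance (str : String) : Decidable (Pre_minsik_encode str) := by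
  unfold Pre_minsik_encode; infer_instance

def pvWitness_minsik_encode : String := "minsik"

def Spec_minsik_encode (str : String) (out : String) : Prop := out = minsik_encode_alt str
instance (str : String) (out : String) : Decidable (Spec_minsik_encode str out) := by
  unfold Spec_minsik_encode; infer_instance

-- ===== CLAIM (what is proved, stated in full; the proofs are below) =====
def Claim_equal_minsik_encode : Prop :=
  ∀ (str : String), Dom_minsik_encode str → Pre_minsik_encode str →
    Spec_minsik_encode str (minsik_encode str)

-- ===== LEMMAS AND PROOFS =====

-- pure single-character code map (what both dict lookups compute on mapped chars)
def encC (c : Char) : Char := minsikCharMap.getD c '?'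

-- the common reference encoding, by structural recursion on the character list
def encScan : List Char → List Char
  | [] => []
  | c :: r =>
    if c = 'n' ∧ r.head? = some 'g' then 'l' :: encScan r.tail else encC c :: encScan r
termination_by l => l.length
decreasing_by all_goals (simp [List.length_tail]; try omega)

-- A's per-index scan, as a recursion producing the appended string pieces
def scanS : List Char → List String
  | [] => []
  | c :: r =>
    if c = 'n' ∧ r.head? = some 'g' then minsikDict.getD "ng" "" :: scanS r.tail
    else minsikDict.getD (String.ofList [c]) "" :: scanS r
termination_by l => l.length
decreasing_by all_goals (simp [List.length_tail]; try omega)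

-- B's split('ng'), as a recursion accumulating the current segment
def splitRec : List Char → List Char → List (List Char)
  | pre, [] => [pre]
  | pre, c :: r =>
    if c = 'n' ∧ r.head? = some 'g' then pre :: splitRec [] r.tail
    else splitRec (pre ++ [c]) r
termination_by _ l => l.length
decreasing_by all_goals (simp [List.length_tail]; try omega)

theorem go_spec : ∀ (fuel : Nat) (l cur : List Char) (hacc : List (List Char)),
    l.length < fuel →
    PySem.Chars.splitOn.go ['n','g'] fuel l cur hacc = hacc.reverse ++ splitRec cur.reverse l := by
  intro fuel
  induction fuel with
  | zero => intro l cur hacc h; omega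
  | succ fuel ih =>
    intro l cur hacc h
    cases l with
    | nil => simp [PySem.Chars.splitOn.go, splitRec]
    | cons c rest =>
      rw [PySem.Chars.splitOn.go]
      by_cases hp : ['n','g'].isPrefixOf (c :: rest) = true
      · rcases (List.isPrefixOf_iff_prefix.mp hp) with ⟨t, ht⟩
        simp at ht
        obtain ⟨rfl, rfl⟩ : c = 'n' ∧ rest = 'g' :: t := by
          obtain ⟨h1, h2⟩ := ht; exact ⟨h1.symm, h2.symm⟩
        simp only [hp, if_pos]
        rw [ih _ _ _ (by simp at h ⊢; omega)]
        rw [splitRec]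
        simp
      · simp only [hp, Bool.false_eq_true, if_neg, not_false_iff]
        rw [ih _ _ _ (by simp at h ⊢; omega)]
        have hg : ¬ (c = 'n' ∧ rest.head? = some 'g') := by
          rintro ⟨rfl, hh⟩
          cases rest with
          | nil => simp at hh
          | cons d r' =>
            simp at hh
            subst hh
            simp [List.isPrefixOf] at hp
        conv_rhs => rw [splitRec]
        simp [hg, List.reverse_cons]
theorem splitOn_eq (l : List Char) : PySem.Chars.splitOn l ['n','g'] = splitRec [] l := by
  have := go_spec (l.length + 1) l [] [] (by omega)
  simpa [PySem.Chars.splitOn] using this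
theorem splitRec_ne_nil (pre l : List Char) : splitRec pre l ≠ [] := by
  induction pre, l using splitRec.induct with
  | case1 pre => simp [splitRec]
  | case2 pre c r hg ih => rw [splitRec]; simp [hg]
  | case3 pre c r hg ih => rw [splitRec]; simp [hg]; exact ih
theorem join_nil_cons (p : List Char) (ps : List (List Char)) :
    PySem.Chars.join [] (p :: ps) = p ++ PySem.Chars.join [] ps := by
  cases ps with
  | nil => simp [PySem.Chars.join_singleton, PySem.Chars.join_nil]
  | cons q t => rw [PySem.Chars.join_cons_cons]; simp
theorem join_cons_of_ne_nil (sep p : List Char) (ps : List (List Char)) (h : ps ≠ []) :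
    PySem.Chars.join sep (p :: ps) = p ++ sep ++ PySem.Chars.join sep ps := by
  obtain ⟨q, t, rfl⟩ := List.exists_cons_of_ne_nil h
  rw [PySem.Chars.join_cons_cons]
theorem join_bridge (pre l : List Char) :
    PySem.Chars.join ['l'] ((splitRec pre l).map (List.map encC))
      = pre.map encC ++ encScan l := by
  induction pre, l using splitRec.induct with
  | case1 pre => simp [splitRec, encScan, PySem.Chars.join_singleton]
  | case2 pre c r hg ih =>
    rw [splitRec, if_pos hg, encScan, if_pos hg]
    rw [List.map_cons, join_cons_of_ne_nil _ _ _ (by simp [splitRec_ne_nil]), ih]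
    simp
  | case3 pre c r hg ih =>
    rw [splitRec, if_neg hg, encScan, if_neg hg, ih]
    simp
theorem perChar (c : Char)
    (h : (['a','b','k','d','e','g','h','i','l','m','n','o','p','r','s','t','u','w','y'].contains c) = true) :
    (minsikDict.getD (String.ofList [c]) "").toList = [encC c] := by
  have hm : c ∈ ['a','b','k','d','e','g','h','i','l','m','n','o','p','r','s','t','u','w','y'] :=
    List.mem_of_elem_eq_true h
  fin_cases hm <;> decide
theorem scan_join (l : List Char)
    (h : (l.all (fun c =>
      ['a','b','k','d','e','g','h','i','l','m','n','o','p','r','s','t','u','w','y'].contains c)) = true) :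
    PySem.Chars.join [] ((scanS l).map String.toList) = encScan l := by
  induction l using scanS.induct with
  | case1 => simp [scanS, encScan, PySem.Chars.join_nil]
  | case2 c r hg ih =>
    obtain ⟨rfl, hr⟩ := hg
    rw [scanS, if_pos ⟨rfl, hr⟩, encScan, if_pos ⟨rfl, hr⟩]
    rw [List.map_cons, join_nil_cons]
    rw [ih ?_]
    · rfl
    · simp only [List.all_cons, Bool.and_eq_true] at h
      cases r with
      | nil => simp at hr
      | cons d r' =>
        simp at hr; subst hr
        simp only [List.tail_cons]
        simp only [List.all_cons, Bool.and_eq_true] at h ⊢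
        exact h.2.2
  | case3 c r hg ih =>
    simp only [List.all_cons, Bool.and_eq_true] at h
    rw [scanS, if_neg hg, encScan, if_neg hg]
    rw [List.map_cons, join_nil_cons, ih h.2, perChar c h.1]
    rfl
theorem loopA (s : List Char) : ∀ (n k : Nat) (acc : List String), k + n = s.length →
    (PySem.List.pyRange (k : Int) (s.length : Int) 1).foldl (minsikStep s) (acc, false)
      = (acc ++ scanS (s.drop k), false) := by
  intro n
  induction n using Nat.strong_induction_on with
  | _ n ih =>
    intro k acc hk
    rcases Nat.eq_zero_or_pos n with rfl | hn
    · have hkl : k = s.length := by omega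
      subst hkl
      simp [pysem, List.drop_of_length_le (le_refl s.length), scanS]
    · have hklt : k < s.length := by omega
      have h1 : (k : Int) < (s.length : Int) := by exact_mod_cast hklt
      rw [PySem.List.pyRange_one_cons h1, List.foldl_cons]
      have hget : PySem.List.pyGetD s (k : Int) ' ' = s[k] := by
        rw [PySem.List.pyGetD_eq_getElem s ' ' (by positivity) h1]
        simp
      have hdrop : s.drop k = s[k] :: s.drop (k + 1) := (List.getElem_cons_drop hklt).symm
      by_cases hg : (s[k] = 'n' ∧ k + 1 < s.length ∧ s[k + 1]? = some 'g')
      · -- 'ng' branch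
        obtain ⟨hc, hk1, hg1'⟩ := hg
        rw [List.getElem?_eq_getElem hk1] at hg1'
        have hg1 : s[k + 1]'(by omega) = 'g' := by simpa using hg1'
        have hget1 : PySem.List.pyGetD s ((k : Int) + 1) ' ' = s[k + 1]'(by omega) := by
          rw [show ((k : Int) + 1) = ((k + 1 : Nat) : Int) by push_cast; ring]
          rw [PySem.List.pyGetD_eq_getElem s ' ' (by positivity) (by exact_mod_cast hk1)]
          simp
        have hcond : (PySem.List.pyGetD s (k : Int) ' ' == 'n'
            && decide ((k : Int) < (s.length : Int) - 1)
            && (PySem.List.pyGetD s ((k : Int) + 1) ' ' == 'g')) = true := by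
          rw [hget, hget1, hc, hg1]
          have hlt : (k : Int) < (s.length : Int) - 1 := by
            have h2 : ((k : Int) + 1) < (s.length : Int) := by exact_mod_cast hk1
            omega
          simp [hlt]
        have hstep : minsikStep s (acc, false) (k : Int)
            = (acc ++ [minsikDict.getD "ng" ""], true) := by
          simp only [minsikStep, Bool.false_eq_true, hcond, if_pos]
          simp
        rw [hstep]
        have h2 : ((k : Int) + 1) < (s.length : Int) := by exact_mod_cast hk1
        rw [PySem.List.pyRange_one_cons h2, List.foldl_cons]
        have hstep2 : minsikStep s (acc ++ [minsikDict.getD "ng" ""], true) ((k : Int) + 1)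
            = (acc ++ [minsikDict.getD "ng" ""], false) := by
          simp [minsikStep]
        rw [hstep2]
        rw [show ((k : Int) + 1 + 1) = ((k + 2 : Nat) : Int) by push_cast; ring]
        rw [ih (n - 2) (by omega) (k + 2) _ (by omega)]
        have hdrop1 : s.drop (k + 1) = s[k + 1]'(by omega) :: s.drop (k + 2) :=
          (List.getElem_cons_drop hk1).symm
        rw [hdrop, hdrop1, hc, hg1]
        rw [scanS]
        simp
      · -- ordinary branch
        have hcond : (PySem.List.pyGetD s (k : Int) ' ' == 'n'
            && decide ((k : Int) < (s.length : Int) - 1)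
            && (PySem.List.pyGetD s ((k : Int) + 1) ' ' == 'g')) = false := by
          by_cases hc : s[k] = 'n'
          · by_cases hk1 : k + 1 < s.length
            · have hget1 : PySem.List.pyGetD s ((k : Int) + 1) ' ' = s[k + 1]'(by omega) := by
                rw [show ((k : Int) + 1) = ((k + 1 : Nat) : Int) by push_cast; ring]
                rw [PySem.List.pyGetD_eq_getElem s ' ' (by positivity) (by exact_mod_cast hk1)]
                simp
              have : ¬ (s[k + 1]'(by omega) = 'g') := fun hgg =>
                hg ⟨hc, hk1, by rw [List.getElem?_eq_getElem hk1]; simpa using hgg⟩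
              rw [hget, hget1]
              simp [this]
            · have : ¬ ((k : Int) < (s.length : Int) - 1) := by
                intro hlt; exact hk1 (by omega)
              simp [this]
          · rw [hget]; simp [hc]
        have hstep : minsikStep s (acc, false) (k : Int)
            = (acc ++ [minsikDict.getD (String.ofList [s[k]]) ""], false) := by
          simp only [minsikStep, Bool.false_eq_true, hcond]
          simp [hget]
        rw [hstep]
        rw [show ((k : Int) + 1) = ((k + 1 : Nat) : Int) by push_cast; ring]
        rw [ih (n - 1) (by omega) (k + 1) _ (by omega)]
        have hgscan : ¬ (s[k] = 'n' ∧ (s.drop (k + 1)).head? = some 'g') := by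
          rintro ⟨hc, hh⟩
          rw [List.head?_drop] at hh
          by_cases hk1 : k + 1 < s.length
          · rw [List.getElem?_eq_getElem hk1] at hh
            exact hg ⟨hc, hk1, by rw [List.getElem?_eq_getElem hk1]; simpa using hh⟩
          · rw [List.getElem?_eq_none (by omega)] at hh
            simp at hh
        rw [hdrop, scanS, if_neg hgscan]
        simp

-- ===== VERDICT (by name: the statement is the Claim_ definition above) =====
theorem minsik_encode_spec : Claim_equal_minsik_encode := by
  intro str _ hpre
  unfold Spec_minsik_encode
  unfold Pre_minsik_encode at hpre
  have hA : minsik_encode str = PySem.Str.join "" (scanS str.toList) := by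
    unfold minsik_encode
    rw [show ((0 : Int)) = ((0 : Nat) : Int) by simp]
    rw [loopA str.toList str.toList.length 0 [] (by omega)]
    simp
  have hB : minsik_encode_alt str = String.ofList (encScan str.toList) := by
    unfold minsik_encode_alt
    rw [splitOn_eq]
    have hfun : (fun seg : List Char => seg.map (fun c => minsikCharMap.getD c '?'))
        = List.map encC := rfl
    rw [hfun, join_bridge]
    simp
  rw [hA, hB]
  have h1 : (PySem.Str.join "" (scanS str.toList)).toList = encScan str.toList := by
    rw [PySem.Str.toList_join]
    simpa using scan_join str.toList hpre
  calc PySem.Str.join "" (scanS str.toList)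
      = String.ofList (PySem.Str.join "" (scanS str.toList)).toList :=
        String.ofList_toList.symm
    _ = String.ofList (encScan str.toList) := by rw [h1]
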